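-- pv_equiv track=rewrite | github.com/Yotter/Maxsweeper | test_Minesweeper.py | config_mtrx
-- ===== SOURCE A (Python) =====
-- def config_mtrx(config_dict):
--     """
--     Create a more readable matrix from a config dictionary
--     @param config_dict: dictionary of tile coordinates to True / False / None
--
--     @return: 2d array of characters:
--         - 'x': bomb
--         - 'n': not a bomb
--         - '?': unknown tile
--         - ' ': not in config
--     """
--     config_mtrx = []
--     width = max([x for x, y in config_dict.keys()]) + 1
--     height = max([y for x, y in config_dict.keys()]) + 1
--     for y in range(height):
--         config_mtrx.append([' '] * width)
--
--     for coords, value in config_dict.items():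
--         x, y = coords
--         if value == True:
--             config_mtrx[y][x] = 'x'
--         elif value == False:
--             config_mtrx[y][x] = 'n'
--         elif value == None:
--             config_mtrx[y][x] = '?'
--     return config_mtrx
-- ===== SOURCE B (Python) =====
-- def config_mtrx(config_dict):
--     """
--     Create a more readable matrix from a config dictionary.
--     Pure gather formulation: every cell of the grid is computed independently
--     by scanning the config entries for that coordinate; nothing is
--     preallocated or mutated.
--     """
--     width = max(x for x, y in config_dict) + 1
--     height = max(y for x, y in config_dict) + 1
--     chars = {True: 'x', False: 'n', None: '?'}
--
--     def cell(x, y):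
--         for (cx, cy), v in config_dict.items():
--             if cx == x and cy == y:
--                 return chars[v]
--         return ' '
--
--     return [[cell(x, y) for x in range(width)] for y in range(height)]
-- ===== Notes on version B (the rewrite author's own statement) =====
-- stated objective: alternative
-- what changed: Replaces A's allocate-then-scatter (preallocate a blank matrix, then overwrite cells while iterating the dict) by a pure per-cell gather: each cell of the result is computed independently by a linear search of the config entries for its coordinate, with no preallocation, no mutation and no intermediate structure; …
-- outside the precondition, e.g. on config_mtrx({(0, 0): True, (-1, 0): False}): A returns [['n']], B returns [['x']]; on config_mtrx({(0, 0): True, (-2, 0): False}): A raises IndexError, B returns [['x']]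
import Mathlib
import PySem

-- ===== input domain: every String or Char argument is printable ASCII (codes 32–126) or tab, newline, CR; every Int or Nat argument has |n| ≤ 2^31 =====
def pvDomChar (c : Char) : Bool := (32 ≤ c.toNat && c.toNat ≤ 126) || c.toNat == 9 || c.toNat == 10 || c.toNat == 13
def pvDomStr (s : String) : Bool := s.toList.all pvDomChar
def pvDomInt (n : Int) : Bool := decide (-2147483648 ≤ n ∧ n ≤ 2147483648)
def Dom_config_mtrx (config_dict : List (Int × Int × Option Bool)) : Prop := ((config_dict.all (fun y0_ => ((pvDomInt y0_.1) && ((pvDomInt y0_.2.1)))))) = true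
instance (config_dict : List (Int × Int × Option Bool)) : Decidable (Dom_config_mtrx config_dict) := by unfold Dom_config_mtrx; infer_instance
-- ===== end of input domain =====

-- B replaces A's allocate-then-scatter by a pure per-cell gather (each cell found by a linear
-- search of the entries); objective: alternative. Pre_ restricts to the natural domain
-- (nonempty, nonnegative distinct tile coordinates). Equivalence of RETURN values only.

-- ===== PORT A =====
-- 'if value == True: "x" elif value == False: "n" elif value == None: "?"' (all three cases of Option Bool)
def pyCharOf (v : Option Bool) : String :=
  if v = some true then "x" else if v = some false then "n" else "?"

-- 'config_mtrx[y][x] = c' with Python index semantics (negative index from the end;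
-- out of range = IndexError, which Pre_ excludes — the write is then skipped)
def pyAssign (m : List (List String)) (y x : Int) (c : String) : List (List String) :=
  match PySem.List.pyGet? m y with
  | none => m
  | some row => PySem.List.pySetD m y (PySem.List.pySetD row x c)

def config_mtrx (config_dict : List (Int × Int × Option Bool)) : List (List String) :=
  let width : Int := ((PySem.List.max? (config_dict.map (fun t => t.1)) id).getD (-1)) + 1
  let height : Int := ((PySem.List.max? (config_dict.map (fun t => t.2.1)) id).getD (-1)) + 1
  let m0 : List (List String) :=
    (PySem.List.pyRange 0 height 1).map (fun _ => List.replicate width.toNat " ")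
  config_dict.foldl (fun m t => pyAssign m t.2.1 t.1 (pyCharOf t.2.2)) m0

-- ===== PORT B =====
-- Source B's chars table {True:'x', False:'n', None:'?'} looked up at v
def altChar (v : Option Bool) : String :=
  match v with | some true => "x" | some false => "n" | none => "?"

-- Source B's 'cell': scan the entries for this coordinate, early return on the first match
def altCell (config_dict : List (Int × Int × Option Bool)) (x y : Int) : String :=
  match config_dict.find? (fun t => t.1 == x && t.2.1 == y) with
  | some t => altChar t.2.2
  | none => " "

def config_mtrx_alt (config_dict : List (Int × Int × Option Bool)) : List (List String) :=
  let width : Int := ((PySem.List.max? (config_dict.map (fun t => t.1)) id).getD (-1)) + 1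
  let height : Int := ((PySem.List.max? (config_dict.map (fun t => t.2.1)) id).getD (-1)) + 1
  (PySem.List.pyRange 0 height 1).map (fun y =>
    (PySem.List.pyRange 0 width 1).map (fun x => altCell config_dict x y))

-- ===== PRECONDITION & SPEC =====
-- Pre_ restricts to the function's natural domain: a nonempty config (A raises ValueError from
-- max on the empty dict) whose tile coordinates are nonnegative grid positions with pairwise
-- distinct keys (the invariant of the Python dict this list models). Negative coordinates are
-- malformed for a tile grid and excluded: there A happens to scatter through Python's
-- negative-index list wraparound when the coordinate is at least -width/-height and raises
-- IndexError otherwise, while B leaves cells with no entry at their literal coordinate blank.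
def Pre_config_mtrx (config_dict : List (Int × Int × Option Bool)) : Prop :=
  config_dict ≠ [] ∧
    (∀ t ∈ config_dict, 0 ≤ t.1 ∧ 0 ≤ t.2.1) ∧
    (config_dict.map (fun t => (t.1, t.2.1))).Nodup
instance (config_dict : List (Int × Int × Option Bool)) : Decidable (Pre_config_mtrx config_dict) := by
  unfold Pre_config_mtrx; infer_instance

def pvWitness_config_mtrx : (List (Int × Int × Option Bool)) :=
  [(0, 0, some true), (2, 1, some false), (1, 1, none)]

def Spec_config_mtrx (config_dict : List (Int × Int × Option Bool)) (out : List (List String)) : Prop := out = config_mtrx_alt config_dict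
instance (config_dict : List (Int × Int × Option Bool)) (out : List (List String)) : Decidable (Spec_config_mtrx config_dict out) := by unfold Spec_config_mtrx; infer_instance

-- ===== CLAIM (what is proved, stated in full; the proofs are below) =====
def Claim_equal_config_mtrx : Prop := ∀ (config_dict : List (Int × Int × Option Bool)), Dom_config_mtrx config_dict → Pre_config_mtrx config_dict → Spec_config_mtrx config_dict (config_mtrx config_dict)

-- ===== LEMMAS AND PROOFS =====

-- width / height exactly as both Pythons compute them (max over the keys, plus one)
def pvW (config_dict : List (Int × Int × Option Bool)) : Int :=
  ((PySem.List.max? (config_dict.map (fun t => t.1)) id).getD (-1)) + 1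
def pvH (config_dict : List (Int × Int × Option Bool)) : Int :=
  ((PySem.List.max? (config_dict.map (fun t => t.2.1)) id).getD (-1)) + 1


-- the two character tables agree
theorem altChar_eq_pyCharOf : altChar = pyCharOf := by
  funext v
  rcases v with _ | b
  · rfl
  · cases b <;> rfl

-- range(n) for a nonnegative bound
theorem pyRange01 (n : Int) (h : 0 ≤ n) :
    PySem.List.pyRange 0 n 1 = (List.range n.toNat).map Nat.cast := by
  unfold PySem.List.pyRange
  by_cases h2 : (0 : Int) < n
  · rw [if_neg (by norm_num), if_pos (by norm_num), if_pos h2,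
      (by omega : ((n - 0 + 1 - 1) / 1 : Int) = n)]
    refine List.map_congr_left fun k _ => ?_
    simp
  · have hn : n = 0 := by omega
    subst hn
    simp

-- Python's index normalization 'i if i >= 0 else i + n' used by A's list writes
def normIdx (i n : Int) : Int := if 0 ≤ i then i else i + n

theorem pyIdx?_norm (n : Nat) (i : Int) (h1 : -(n : Int) ≤ i) (h2 : i < n) :
    PySem.List.pyIdx? n i = some (normIdx i n).toNat := by
  unfold PySem.List.pyIdx? normIdx
  split_ifs with h0 <;> simp_all <;> omega

theorem normIdx_nonneg (i n : Int) (h1 : -n ≤ i) : 0 ≤ normIdx i n := by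
  unfold normIdx; split_ifs <;> omega

theorem normIdx_lt (i n : Int) (h2 : i < n) (h0 : 0 ≤ n) : normIdx i n < n := by
  unfold normIdx; split_ifs <;> omega

theorem getD_set_eq {α : Type} (l : List α) (i : Nat) (a d : α) (h : i < l.length) :
    (l.set i a).getD i d = a := by
  simp [List.getD_eq_getElem?_getD, h]

theorem getD_set_ne {α : Type} (l : List α) {i j : Nat} (a d : α) (h : i ≠ j) :
    (l.set i a).getD j d = l.getD j d := by
  simp [List.getD_eq_getElem?_getD, List.getElem?_set_ne h]

-- hit predicate: entry t writes / marks cell (xx, yy) under A's wraparound write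
def pvHit (W H : Int) (xx yy : Nat) (t : Int × Int × Option Bool) : Bool :=
  (normIdx t.1 W, normIdx t.2.1 H) == ((xx : Int), (yy : Int))

-- the value of cell (xx, yy) after A's scatter: the char of the LAST entry writing it, else ' '
def pvCell (cfg : List (Int × Int × Option Bool)) (W H : Int) (xx yy : Nat) : String :=
  match cfg.reverse.find? (pvHit W H xx yy) with
  | some t => pyCharOf t.2.2
  | none => " "

-- read cell (xx, yy) of a matrix, ' ' out of range
def pvPeek (m : List (List String)) (xx yy : Nat) : String :=
  (m.getD yy []).getD xx " "

theorem B_unfold (cfg : List (Int × Int × Option Bool)) : config_mtrx_alt cfg =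
    (PySem.List.pyRange 0 (pvH cfg) 1).map (fun y =>
      (PySem.List.pyRange 0 (pvW cfg) 1).map (fun x => altCell cfg x y)) := rfl

theorem A_unfold (cfg : List (Int × Int × Option Bool)) : config_mtrx cfg =
    cfg.foldl (fun m t => pyAssign m t.2.1 t.1 (pyCharOf t.2.2))
      ((PySem.List.pyRange 0 (pvH cfg) 1).map (fun _ => List.replicate (pvW cfg).toNat " ")) := rfl

-- a single Python assignment m[y][x] = c, for in-range indices, as List.set
theorem pyAssign_eq (W H : Int) (m : List (List String)) (y x : Int) (c : String)
    (hm : (m.length : Int) = H) (hrows : ∀ row ∈ m, (row.length : Int) = W)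
    (hy1 : -H ≤ y) (hy2 : y < H) (hx1 : -W ≤ x) (hx2 : x < W) :
    pyAssign m y x c =
      m.set (normIdx y H).toNat ((m.getD (normIdx y H).toNat []).set (normIdx x W).toNat c) := by
  have hH0 : 0 ≤ H := by omega
  have hny : (normIdx y H).toNat < m.length := by
    have := normIdx_nonneg y H hy1
    have := normIdx_lt y H hy2 hH0
    omega
  have hidxy : PySem.List.pyIdx? m.length y = some (normIdx y H).toNat := by
    have h := pyIdx?_norm m.length y (by omega) (by omega)
    rwa [hm] at h
  have hrow : m.getD (normIdx y H).toNat [] = m[(normIdx y H).toNat] :=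
    List.getD_eq_getElem m [] hny
  have hget : PySem.List.pyGet? m y = some (m.getD (normIdx y H).toNat []) := by
    unfold PySem.List.pyGet?
    rw [hidxy, hrow]
    simp [List.getElem?_eq_getElem hny]
  have hrl : ((m.getD (normIdx y H).toNat []).length : Int) = W := by
    rw [hrow]; exact hrows _ (List.getElem_mem hny)
  have hidxx : PySem.List.pyIdx? (m.getD (normIdx y H).toNat []).length x
      = some (normIdx x W).toNat := by
    have h := pyIdx?_norm (m.getD (normIdx y H).toNat []).length x (by omega) (by omega)
    rwa [hrl] at h
  unfold pyAssign PySem.List.pySetD PySem.List.pySet?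
  rw [hget]
  dsimp only
  rw [hidxx, hidxy]
  rfl

-- the scatter loop, cell by cell: last write wins
theorem scatter_peek (W H : Int) :
    ∀ (l : List (Int × Int × Option Bool)) (m : List (List String)),
      (∀ t ∈ l, -W ≤ t.1 ∧ t.1 < W ∧ -H ≤ t.2.1 ∧ t.2.1 < H) →
      ((m.length : Int) = H) →
      (∀ row ∈ m, (row.length : Int) = W) →
      (l.foldl (fun m t => pyAssign m t.2.1 t.1 (pyCharOf t.2.2)) m).length = m.length ∧
      (∀ row ∈ (l.foldl (fun m t => pyAssign m t.2.1 t.1 (pyCharOf t.2.2)) m),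
        (row.length : Int) = W) ∧
      (∀ xx yy : Nat,
        pvPeek (l.foldl (fun m t => pyAssign m t.2.1 t.1 (pyCharOf t.2.2)) m) xx yy =
          match l.reverse.find? (pvHit W H xx yy) with
          | some t => pyCharOf t.2.2
          | none => pvPeek m xx yy) := by
  intro l
  induction l with
  | nil =>
    intro m _ hm hrows
    refine ⟨rfl, hrows, ?_⟩
    intro xx yy
    simp [pvPeek]
  | cons t ts ih =>
    intro m hl hm hrows
    have hb := hl t (List.mem_cons_self ..)
    have hH0 : 0 ≤ H := by omega
    have hW0 : 0 ≤ W := by omega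
    have hnx0 := normIdx_nonneg t.1 W hb.1
    have hnxW := normIdx_lt t.1 W hb.2.1 hW0
    have hny0 := normIdx_nonneg t.2.1 H hb.2.2.1
    have hnyH := normIdx_lt t.2.1 H hb.2.2.2 hH0
    set ny := (normIdx t.2.1 H).toNat with hnydef
    set nx := (normIdx t.1 W).toNat with hnxdef
    have hny : ny < m.length := by omega
    have hrowlen : ((m.getD ny []).length : Int) = W := by
      rw [List.getD_eq_getElem m [] hny]
      exact hrows _ (List.getElem_mem hny)
    have hnx : nx < (m.getD ny []).length := by omega
    have hstep : pyAssign m t.2.1 t.1 (pyCharOf t.2.2)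
        = m.set ny ((m.getD ny []).set nx (pyCharOf t.2.2)) :=
      pyAssign_eq W H m t.2.1 t.1 _ hm hrows hb.2.2.1 hb.2.2.2 hb.1 hb.2.1
    set m' := m.set ny ((m.getD ny []).set nx (pyCharOf t.2.2)) with hm'def
    have hm'len : (m'.length : Int) = H := by rw [hm'def, List.length_set]; exact hm
    have hm'rows : ∀ row ∈ m', (row.length : Int) = W := by
      intro row hr
      rcases List.mem_or_eq_of_mem_set hr with h | h
      · exact hrows _ h
      · subst h
        rw [List.length_set]
        exact hrowlen
    obtain ⟨ih1, ih2, ih3⟩ := ih m' (fun t ht => hl t (List.mem_cons_of_mem _ ht)) hm'len hm'rows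
    simp only [List.foldl_cons, hstep]
    refine ⟨by rw [ih1, hm'def, List.length_set], ih2, ?_⟩
    intro xx yy
    rw [ih3 xx yy]
    simp only [List.reverse_cons, List.find?_append, List.find?_cons, List.find?_nil]
    cases hfind : ts.reverse.find? (pvHit W H xx yy) with
    | some t' => rfl
    | none =>
      simp only [Option.none_or]
      by_cases hhit : pvHit W H xx yy t
      · -- t writes exactly cell (xx, yy)
        have hxy : normIdx t.1 W = (xx : Int) ∧ normIdx t.2.1 H = (yy : Int) := by
          simpa [pvHit, Prod.ext_iff] using hhit
        have hxxnx : xx = nx := by omega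
        have hyyny : yy = ny := by omega
        subst hxxnx; subst hyyny
        simp only [hhit, pvPeek, hm'def]
        rw [getD_set_eq _ _ _ _ hny, getD_set_eq _ _ _ _ hnx]
      · -- t writes some other cell: the peek is unchanged
        simp only [hhit, pvPeek, hm'def]
        by_cases hyeq : ny = yy
        · subst hyeq
          have hxne : nx ≠ xx := by
            intro h
            apply hhit
            have h1 : normIdx t.1 W = (xx : Int) := by omega
            have h2 : normIdx t.2.1 H = (ny : Int) := by omega
            simp [pvHit, h1, h2]
          rw [getD_set_eq _ _ _ _ hny, getD_set_ne _ _ _ hxne]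
        · rw [getD_set_ne _ _ _ hyeq]

-- width and height are at least 1 inside Pre_, and every entry is in range
theorem pre_facts (cfg : List (Int × Int × Option Bool)) (h : Pre_config_mtrx cfg) :
    1 ≤ pvW cfg ∧ 1 ≤ pvH cfg ∧
      ∀ t ∈ cfg, -(pvW cfg) ≤ t.1 ∧ t.1 < pvW cfg ∧
        -(pvH cfg) ≤ t.2.1 ∧ t.2.1 < pvH cfg := by
  obtain ⟨hne, hb, -⟩ := h
  obtain ⟨mx, hmx⟩ : ∃ mx, PySem.List.max? (cfg.map (fun t => t.1)) id = some mx := by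
    cases hx : PySem.List.max? (cfg.map (fun t => t.1)) id with
    | none =>
      exact absurd (List.map_eq_nil_iff.mp ((PySem.List.max?_eq_none_iff _ _).mp hx)) hne
    | some v => exact ⟨v, rfl⟩
  obtain ⟨my, hmy⟩ : ∃ my, PySem.List.max? (cfg.map (fun t => t.2.1)) id = some my := by
    cases hx : PySem.List.max? (cfg.map (fun t => t.2.1)) id with
    | none =>
      exact absurd (List.map_eq_nil_iff.mp ((PySem.List.max?_eq_none_iff _ _).mp hx)) hne
    | some v => exact ⟨v, rfl⟩
  have hWe : pvW cfg = mx + 1 := by simp [pvW, hmx]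
  have hHe : pvH cfg = my + 1 := by simp [pvH, hmy]
  obtain ⟨tx, htx, htx1⟩ := List.mem_map.mp (PySem.List.max?_mem hmx)
  obtain ⟨ty, hty, hty1⟩ := List.mem_map.mp (PySem.List.max?_mem hmy)
  have hW1 : 1 ≤ pvW cfg := by
    have := (hb tx htx).1
    omega
  have hH1 : 1 ≤ pvH cfg := by
    have := (hb ty hty).2
    omega
  refine ⟨hW1, hH1, ?_⟩
  intro t ht
  have h1 := PySem.List.max?_isMax hmx t.1 (List.mem_map.mpr ⟨t, ht, rfl⟩)
  have h2 := PySem.List.max?_isMax hmy t.2.1 (List.mem_map.mpr ⟨t, ht, rfl⟩)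
  simp only [id] at h1 h2
  have hp := hb t ht
  exact ⟨by omega, by omega, by omega, by omega⟩

-- find? only looks at members
theorem find?_congr_mem {α : Type} (p q : α → Bool) :
    ∀ l : List α, (∀ a ∈ l, p a = q a) → l.find? p = l.find? q := by
  intro l
  induction l with
  | nil => intro _; rfl
  | cons a l ih =>
    intro h
    simp only [List.find?_cons, h a (List.mem_cons_self ..)]
    cases q a
    · exact ih fun a ha => h a (List.mem_cons_of_mem _ ha)
    · rfl

-- with at most one matching element, searching from either end finds the same one
theorem reverse_find?_eq {α : Type} (p : α → Bool) :
    ∀ l : List α, l.countP p ≤ 1 → l.reverse.find? p = l.find? p := by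
  intro l
  induction l with
  | nil => intro _; rfl
  | cons a l ih =>
    intro h
    rw [List.countP_cons] at h
    simp only [List.reverse_cons, List.find?_append, List.find?_cons, List.find?_nil]
    by_cases hpa : p a
    · have hc : l.countP p = 0 := by rw [if_pos hpa] at h; omega
      have hnone : l.find? p = none :=
        List.find?_eq_none.mpr fun x hx hpx => by
          have := (List.countP_eq_zero.mp hc) x hx
          simp [hpx] at this
      have hnone' : l.reverse.find? p = none :=
        List.find?_eq_none.mpr fun x hx hpx => by
          have := (List.countP_eq_zero.mp hc) x (List.mem_reverse.mp hx)
          simp [hpx] at this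
      simp [hpa, hnone, hnone']
    · have hc : l.countP p ≤ 1 := by rw [if_neg hpa] at h; omega
      simp [hpa, ih hc]

-- under Nodup keys and nonnegative coordinates, A's cell value is B's cell value
theorem pvCell_eq_altCell (cfg : List (Int × Int × Option Bool)) (W H : Int)
    (hpos : ∀ t ∈ cfg, 0 ≤ t.1 ∧ 0 ≤ t.2.1)
    (hnd : (cfg.map (fun t => (t.1, t.2.1))).Nodup) (xx yy : Nat) :
    pvCell cfg W H xx yy = altCell cfg (xx : Int) (yy : Int) := by
  have hcongr : cfg.reverse.find? (pvHit W H xx yy)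
      = cfg.reverse.find? (fun t => t.1 == (xx : Int) && t.2.1 == (yy : Int)) := by
    refine find?_congr_mem _ _ _ fun t ht => ?_
    have h := hpos t (List.mem_reverse.mp ht)
    have h1 : normIdx t.1 W = t.1 := by unfold normIdx; rw [if_pos h.1]
    have h2 : normIdx t.2.1 H = t.2.1 := by unfold normIdx; rw [if_pos h.2]
    unfold pvHit
    rw [h1, h2]
    rfl
  have hcnt : cfg.countP (fun t => t.1 == (xx : Int) && t.2.1 == (yy : Int)) ≤ 1 := by
    have h1 : cfg.countP (fun t => t.1 == (xx : Int) && t.2.1 == (yy : Int))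
        = (cfg.map (fun t => (t.1, t.2.1))).count ((xx : Int), (yy : Int)) := by
      rw [List.count_eq_countP, List.countP_map]
      rfl
    rw [h1]
    exact List.nodup_iff_count_le_one.mp hnd _
  rw [pvCell, hcongr, reverse_find?_eq _ cfg (by simpa using hcnt), altCell,
    altChar_eq_pyCharOf]

-- ===== VERDICT (by name: the statement is the Claim_ definition above) =====
theorem config_mtrx_spec : Claim_equal_config_mtrx := by
  intro cfg _dom hpre
  show config_mtrx cfg = config_mtrx_alt cfg
  obtain ⟨hW1, hH1, hbnd⟩ := pre_facts cfg hpre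
  have hpos : ∀ t ∈ cfg, 0 ≤ t.1 ∧ 0 ≤ t.2.1 := hpre.2.1
  have hnd := hpre.2.2
  set W := pvW cfg with hWdef
  set H := pvH cfg with hHdef
  have hHr := pyRange01 H (by omega)
  have hWr := pyRange01 W (by omega)
  -- B side: every cell is altCell
  have hB : config_mtrx_alt cfg =
      (List.range H.toNat).map (fun yy : Nat =>
        (List.range W.toNat).map (fun xx : Nat => altCell cfg (xx : Int) (yy : Int))) := by
    rw [B_unfold, ← hWdef, ← hHdef, hHr, hWr, List.map_map]
    refine List.map_congr_left fun yy _ => ?_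
    simp only [Function.comp_apply, List.map_map]
    rfl
  -- A side: scatter over the blank matrix, cell by cell
  have hm0len : (((PySem.List.pyRange 0 H 1).map
      (fun _ => List.replicate W.toNat " ")).length : Int) = H := by
    rw [hHr]; simp; omega
  have hm0rows : ∀ row ∈ (PySem.List.pyRange 0 H 1).map
      (fun _ => List.replicate W.toNat " "), ((row.length : Int)) = W := by
    intro row hr
    obtain ⟨-, -, hrow⟩ := List.mem_map.mp hr
    rw [← hrow]; simp; omega
  obtain ⟨hlen, hrows, hcells⟩ := scatter_peek W H cfg _ hbnd hm0len hm0rows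
  rw [A_unfold, ← hWdef, ← hHdef, hB]
  set r := cfg.foldl (fun m t => pyAssign m t.2.1 t.1 (pyCharOf t.2.2))
    ((PySem.List.pyRange 0 H 1).map (fun _ => List.replicate W.toNat " ")) with hrdef
  have hrlen : r.length = H.toNat := by
    rw [hlen, hHr]; simp
  apply List.ext_getElem
  · simp [hrlen]
  · intro yy hy1 hy2
    rw [List.getElem_map, List.getElem_range]
    have hyH : yy < H.toNat := by simpa [hrlen] using hy1
    have hrowlen : (r[yy].length : Int) = W := hrows _ (List.getElem_mem hy1)
    apply List.ext_getElem
    · simp only [List.length_map, List.length_range]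
      omega
    · intro xx hx1 hx2
      rw [List.getElem_map, List.getElem_range]
      have hxW : xx < W.toNat := by omega
      have h1 : r[yy][xx] = pvPeek r xx yy := by
        unfold pvPeek
        rw [List.getD_eq_getElem r [] hy1, List.getD_eq_getElem _ " " hx1]
      have hblank : pvPeek ((PySem.List.pyRange 0 H 1).map
          (fun _ => List.replicate W.toNat " ")) xx yy = " " := by
        unfold pvPeek
        rw [hHr, List.map_map]
        rw [List.getD_eq_getElem _ [] (by simpa using hyH)]
        rw [List.getElem_map]
        exact List.getD_replicate " " hxW
      rw [h1, hcells xx yy, hblank]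
      exact pvCell_eq_altCell cfg W H hpos hnd xx yy
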